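-- pv_equiv track=rewrite | github.com/albielee/web-crawler | webcrawler/webcrawler/spiders/food_spider.py | recipe_refiner
-- ===== SOURCE A (Python) =====
-- def recipe_refiner(recipe_list):
--     #it is a new line if:
--     #if has a number at the start
--     #a fraction at the start
--     #a few
--     #handful
--     #other measurements
--     #x, to serve
--     measurements = ['tsp ','tbsp ','g ','kg ','grams ','gram ']
--     values = ['1','2','3','4','5','6','7','8','9','0','½','¼','¾','handful',
--             'a pinch','a few','a couple','a bunch']
--     all_possible_ingredient = ['onion','olive oil','garlic cloves','chilli flakes','chopped tomatoes','caster sugar','penne','cheddar','chicken breast']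
--     #recipe should be an array of tuples (ingredient, value, measurement), e.g. (oliveoil, 2, tsp)
--     def contains_return(input_string, values):
--         for val in values:
--             if(val in input_string):
--                 return val
--         return None
--     def contains_bool(input_string, values):
--         for val in values:
--             if(val in input_string):
--                 return True
--         return False
--
--     def contains_number(input_string, values):
--         return ''.join(i for i in input_string if contains_bool(i, values))
--
--     new_recipe = []
--     line = ['','','']
--
--     for item in recipe_list:
--         item.replace(" ", "")
--
--         measurement = contains_return(item, measurements)
--         ingredient = contains_return(item, all_possible_ingredient)
--
--         containing = contains_bool(item, values)
--         val = contains_number(item, values)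
--
--         #if contains, so new line and if its
--         if(containing):
--             new_recipe.append(line)
--             line = ['','','']
--         if(ingredient != None):
--             line[0] = ingredient
--         if(val != ''):
--             line[1] = val
--         if(measurement != None):
--             line[2] = measurement
--     return new_recipe
-- ===== SOURCE B (Python) =====
-- def recipe_refiner(recipe_list):
--     # Two-phase decomposition: (1) split recipe_list into segments, a new
--     # segment starting at every item that contains a value token (the trailing
--     # segment is never emitted, matching A); (2) build one [ingredient, value,
--     # measurement] triple per collected segment.
--     measurements = ['tsp ','tbsp ','g ','kg ','grams ','gram ']
--     values = ['1','2','3','4','5','6','7','8','9','0','½','¼','¾','handful',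
--             'a pinch','a few','a couple','a bunch']
--     all_possible_ingredient = ['onion','olive oil','garlic cloves','chilli flakes','chopped tomatoes','caster sugar','penne','cheddar','chicken breast']
--
--     def contains_return(input_string, values):
--         for val in values:
--             if(val in input_string):
--                 return val
--         return None
--     def contains_bool(input_string, values):
--         for val in values:
--             if(val in input_string):
--                 return True
--         return False
--     def contains_number(input_string, values):
--         return ''.join(i for i in input_string if contains_bool(i, values))
--
--     # phase 1: segmentation (the current segment 'cur' is dropped at the end)
--     segments = []
--     cur = []
--     for item in recipe_list:
--         item.replace(" ", "")
--         if contains_bool(item, values):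
--             segments.append(cur)
--             cur = [item]
--         else:
--             cur.append(item)
--
--     # phase 2: build a triple from each emitted segment (last match wins)
--     def build(seg):
--         line = ['', '', '']
--         for item in seg:
--             ingredient = contains_return(item, all_possible_ingredient)
--             if ingredient is not None:
--                 line[0] = ingredient
--             val = contains_number(item, values)
--             if val != '':
--                 line[1] = val
--             measurement = contains_return(item, measurements)
--             if measurement is not None:
--                 line[2] = measurement
--         return line
--
--     return [build(seg) for seg in segments]
-- ===== Notes on version B (the rewrite author's own statement) =====
-- stated objective: alternative
-- what changed: A interleaves boundary detection and field accumulation in one stateful loop over a mutable triple; B first splits the list into segments at value-bearing items (dropping the trailing segment, as A does) and then builds each triple from its segment, so the per-item field extraction (ingredient/value/measurement scans) runs only on items of emitted segments instead of on every item.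
import Mathlib
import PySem

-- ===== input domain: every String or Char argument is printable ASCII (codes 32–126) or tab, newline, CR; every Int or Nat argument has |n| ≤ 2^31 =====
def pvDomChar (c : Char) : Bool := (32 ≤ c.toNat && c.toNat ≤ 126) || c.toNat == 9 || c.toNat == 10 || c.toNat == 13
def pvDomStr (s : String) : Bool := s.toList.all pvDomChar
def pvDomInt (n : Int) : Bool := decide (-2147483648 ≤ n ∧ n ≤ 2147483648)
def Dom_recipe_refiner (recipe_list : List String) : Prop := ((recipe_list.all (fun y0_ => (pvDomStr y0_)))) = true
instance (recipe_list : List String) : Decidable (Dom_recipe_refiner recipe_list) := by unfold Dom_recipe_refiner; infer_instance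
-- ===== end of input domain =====

-- B replaces A's single stateful loop (mutable triple + boundary flag) by a two-phase
-- decomposition: split into segments at value-bearing items, then build one triple per
-- emitted segment; same cost, proved to return the same value on the whole domain.


-- ===== PORT A =====
def pvMeasurements : List String := ["tsp ", "tbsp ", "g ", "kg ", "grams ", "gram "]
def pvValues : List String :=
  ["1", "2", "3", "4", "5", "6", "7", "8", "9", "0", "½", "¼", "¾", "handful",
   "a pinch", "a few", "a couple", "a bunch"]
def pvIngredients : List String :=
  ["onion", "olive oil", "garlic cloves", "chilli flakes", "chopped tomatoes",
   "caster sugar", "penne", "cheddar", "chicken breast"]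

-- 'for val in values: if val in input_string: return val' / 'return None'
def contains_return (input_string : String) (values : List String) : Option String :=
  values.find? (fun val => PySem.Str.isIn val input_string)

-- same loop returning a Bool
def contains_bool (input_string : String) (values : List String) : Bool :=
  values.any (fun val => PySem.Str.isIn val input_string)

-- ''.join(i for i in input_string if contains_bool(i, values)): per-character filter
def contains_number (input_string : String) (values : List String) : String :=
  String.ofList (input_string.toList.filter (fun i => contains_bool (String.ofList [i]) values))

-- one iteration of A's for-loop over state (new_recipe, line)
def recipeStepA (st : List (List String) × List String) (item : String) :
    List (List String) × List String :=
  let _ := PySem.Str.replace item " " ""   -- item.replace(" ", ""): result discarded in A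
  let measurement := contains_return item pvMeasurements
  let ingredient := contains_return item pvIngredients
  let containing := contains_bool item pvValues
  let val := contains_number item pvValues
  let new_recipe := if containing then st.1 ++ [st.2] else st.1
  let line := if containing then ["", "", ""] else st.2
  let line := match ingredient with | some i => line.set 0 i | none => line
  let line := if val ≠ "" then line.set 1 val else line
  let line := match measurement with | some m => line.set 2 m | none => line
  (new_recipe, line)

def recipe_refiner (recipe_list : List String) : List (List String) :=
  (recipe_list.foldl recipeStepA ([], ["", "", ""])).1

-- ===== PORT B =====
-- phase 1: one segmentation step over state (segments, cur)
def recipeStepB (st : List (List String) × List String) (item : String) :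
    List (List String) × List String :=
  let _ := PySem.Str.replace item " " ""
  if contains_bool item pvValues then (st.1 ++ [st.2], [item]) else (st.1, st.2 ++ [item])

-- phase 2: build one triple from a segment (last match per field wins)
def buildLine (seg : List String) : List String :=
  seg.foldl
    (fun line item =>
      let line := match contains_return item pvIngredients with
                  | some i => line.set 0 i | none => line
      let val := contains_number item pvValues
      let line := if val ≠ "" then line.set 1 val else line
      match contains_return item pvMeasurements with
      | some m => line.set 2 m | none => line)
    ["", "", ""]

def recipe_refiner_alt (recipe_list : List String) : List (List String) :=
  (recipe_list.foldl recipeStepB ([], [])).1.map buildLine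

-- ===== PRECONDITION & SPEC =====
def Spec_recipe_refiner (recipe_list : List String) (out : List (List String)) : Prop := out = recipe_refiner_alt recipe_list
instance (recipe_list : List String) (out : List (List String)) : Decidable (Spec_recipe_refiner recipe_list out) := by unfold Spec_recipe_refiner; infer_instance

-- ===== CLAIM (what is proved, stated in full; the proofs are below) =====
def Claim_equal_recipe_refiner : Prop := ∀ (recipe_list : List String), Dom_recipe_refiner recipe_list → Spec_recipe_refiner recipe_list (recipe_refiner recipe_list)

-- ===== LEMMAS AND PROOFS =====

-- the shared per-item field update, as performed by buildLine's fold
def updLine (line : List String) (item : String) : List String :=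
  let line := match contains_return item pvIngredients with
              | some i => line.set 0 i | none => line
  let val := contains_number item pvValues
  let line := if val ≠ "" then line.set 1 val else line
  match contains_return item pvMeasurements with
  | some m => line.set 2 m | none => line

lemma buildLine_eq_foldl (seg : List String) :
    buildLine seg = seg.foldl updLine ["", "", ""] := rfl

lemma recipeStepA_eq (st : List (List String) × List String) (item : String) :
    recipeStepA st item =
      if contains_bool item pvValues
      then (st.1 ++ [st.2], updLine ["", "", ""] item)
      else (st.1, updLine st.2 item) := by
  simp only [recipeStepA, updLine]
  by_cases h : contains_bool item pvValues = true <;> simp [h]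

-- phase-1 fold: a prefix of already-closed segments is just carried along
lemma foldB_prefix (xs : List String) (segs : List (List String)) (cur : List String) :
    (xs.foldl recipeStepB (segs, cur)).1 = segs ++ (xs.foldl recipeStepB ([], cur)).1 := by
  induction xs generalizing segs cur with
  | nil => simp
  | cons x xs ih =>
    simp only [List.foldl_cons, recipeStepB]
    by_cases h : contains_bool x pvValues = true
    · simp only [h, if_pos]
      rw [ih (segs ++ [cur]) [x], ih ([] ++ [cur]) [x]]
      simp
    · simp only [h, if_neg, Bool.not_eq_true]
      exact ih segs (cur ++ [x])

-- main invariant: A's loop from (acc, built cur) equals acc ++ built emitted segments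
lemma loop_eq (xs : List String) (acc : List (List String)) (cur : List String) :
    (xs.foldl recipeStepA (acc, cur.foldl updLine ["", "", ""])).1 =
      acc ++ ((xs.foldl recipeStepB ([], cur)).1).map buildLine := by
  induction xs generalizing acc cur with
  | nil => simp
  | cons x xs ih =>
    simp only [List.foldl_cons, recipeStepA_eq, recipeStepB]
    by_cases h : contains_bool x pvValues = true
    · simp only [h, if_pos]
      have h1 : updLine ["", "", ""] x = [x].foldl updLine ["", "", ""] := by simp
      rw [h1, ih (acc ++ [cur.foldl updLine ["", "", ""]]) [x], foldB_prefix xs ([] ++ [cur]) [x]]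
      simp [buildLine_eq_foldl]
    · simp only [h, if_neg, Bool.not_eq_true]
      have h1 : updLine (cur.foldl updLine ["", "", ""]) x = (cur ++ [x]).foldl updLine ["", "", ""] := by
        simp
      rw [h1]
      exact ih acc (cur ++ [x])

-- ===== VERDICT (by name: the statement is the Claim_ definition above) =====
theorem recipe_refiner_spec : Claim_equal_recipe_refiner := by
  intro xs _
  unfold Spec_recipe_refiner recipe_refiner recipe_refiner_alt
  have := loop_eq xs [] []
  simpa using this
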